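-- pv_equiv track=rewrite | github.com/sperciky/platonska-telesa | tetra_cube2.py | find_cube_edges
-- ===== SOURCE A (Python) =====
-- def find_cube_edges(faces):
--     """Najde hrany krychle na základě sousedních stěn"""
--     edges = []
--     for i in range(len(faces)):
--         for j in range(i + 1, len(faces)):
--             shared = len(set(faces[i]) & set(faces[j]))
--             if shared == 2:
--                 edges.append((i, j))
--     return edges
-- ===== SOURCE B (Python) =====
-- def find_cube_edges(faces):
--     """Najde hrany krychle na základě sousedních stěn"""
--     # inverted index: vertex -> (sorted) list of faces containing it
--     incidence = [(v, i) for i, face in enumerate(faces) for v in dict.fromkeys(face)]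
--     index = {}
--     for v, i in incidence:
--         index.setdefault(v, []).append(i)
--     # co-occurring face pairs, one entry per shared vertex
--     cooccur = []
--     for ids in index.values():
--         rest = list(ids)
--         while rest:
--             a = rest.pop(0)
--             cooccur.extend((a, b) for b in rest)
--     counts = {}
--     for p in cooccur:
--         counts[p] = counts.get(p, 0) + 1
--     return sorted(p for p, c in counts.items() if c == 2)
-- ===== Notes on version B (the rewrite author's own statement) =====
-- stated objective: alternative
-- what changed: A compares every pair of faces and intersects their vertex sets; B builds an inverted vertex-to-faces index once, emits one face-pair co-occurrence per shared vertex, counts them with a dictionary, keeps the pairs counted exactly twice and sorts them.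
import Mathlib
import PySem

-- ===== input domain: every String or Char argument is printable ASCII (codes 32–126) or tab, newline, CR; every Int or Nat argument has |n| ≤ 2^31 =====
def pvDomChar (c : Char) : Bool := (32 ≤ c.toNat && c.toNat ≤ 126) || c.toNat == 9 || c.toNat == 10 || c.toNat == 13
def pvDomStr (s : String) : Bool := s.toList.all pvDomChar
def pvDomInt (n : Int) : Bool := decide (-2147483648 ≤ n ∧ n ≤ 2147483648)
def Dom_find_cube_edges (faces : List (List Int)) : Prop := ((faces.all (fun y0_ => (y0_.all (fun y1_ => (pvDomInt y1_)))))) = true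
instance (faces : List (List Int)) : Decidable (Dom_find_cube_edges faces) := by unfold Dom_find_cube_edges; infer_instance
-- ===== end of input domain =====

-- B replaces A's all-pairs intersection scan by an inverted vertex→faces index whose
-- co-occurrence pairs are counted once and then sorted (objective: alternative algorithm).

-- ===== PORT A =====
def find_cube_edges (faces : List (List Int)) : List (Int × Int) :=
  (PySem.List.pyRange 0 (PySem.List.len faces)).foldl (fun edges i =>
    (PySem.List.pyRange (i + 1) (PySem.List.len faces)).foldl (fun edges j =>
      let shared := PySem.Set.len (PySem.Set.inter
        (PySem.Set.ofList (PySem.List.pyGetD faces i []))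
        (PySem.Set.ofList (PySem.List.pyGetD faces j [])))
      if shared == 2 then edges ++ [(i, j)] else edges) edges) []

-- ===== PORT B =====
-- the `while rest: a = rest.pop(0); cooccur.extend((a, b) for b in rest)` loop of Source B
def pvPairsOf : List Int → List (Int × Int)
  | [] => []
  | a :: rest => rest.map (fun b => (a, b)) ++ pvPairsOf rest

def find_cube_edges_alt (faces : List (List Int)) : List (Int × Int) :=
  let incidence : List (Int × Int) :=
    (PySem.List.enumerate faces).flatMap (fun p => (PySem.List.dedup p.2).map (fun v => (v, p.1)))
  -- index.setdefault(v, []).append(i)  =  modify v [] (· ++ [i])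
  let index : PySem.Dict Int (List Int) :=
    incidence.foldl (fun d p => d.modify p.1 [] (fun l => l ++ [p.2])) PySem.Dict.empty
  let cooccur : List (Int × Int) :=
    index.values.foldl (fun acc ids => acc ++ pvPairsOf ids) []
  -- counts[p] = counts.get(p, 0) + 1
  let counts : PySem.Dict (Int × Int) Int :=
    cooccur.foldl (fun d p => d.insert p (d.getD p 0 + 1)) PySem.Dict.empty
  PySem.List.sorted2 ((counts.items.filter (fun pc => pc.2 == 2)).map Prod.fst) Prod.fst Prod.snd

-- ===== PRECONDITION & SPEC =====
def Spec_find_cube_edges (faces : List (List Int)) (out : List (Int × Int)) : Prop := out = find_cube_edges_alt faces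
instance (faces : List (List Int)) (out : List (Int × Int)) : Decidable (Spec_find_cube_edges faces out) := by unfold Spec_find_cube_edges; infer_instance

-- ===== CLAIM (what is proved, stated in full; the proofs are below) =====
def Claim_equal_find_cube_edges : Prop := ∀ (faces : List (List Int)), Dom_find_cube_edges faces → Spec_find_cube_edges faces (find_cube_edges faces)


-- ===== LEMMAS AND PROOFS =====

-- ---- abbreviations used only by the proofs ----
def pvShared (faces : List (List Int)) (i j : Int) : Bool :=
  PySem.Set.len (PySem.Set.inter
    (PySem.Set.ofList (PySem.List.pyGetD faces i []))
    (PySem.Set.ofList (PySem.List.pyGetD faces j []))) == 2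

def pvA (faces : List (List Int)) : List (Int × Int) :=
  (PySem.List.pyRange 0 (PySem.List.len faces)).flatMap (fun i =>
    ((PySem.List.pyRange (i + 1) (PySem.List.len faces)).filter (fun j => pvShared faces i j)).map
      (fun j => (i, j)))

def pvIncidence (faces : List (List Int)) : List (Int × Int) :=
  (PySem.List.enumerate faces).flatMap (fun p => (PySem.List.dedup p.2).map (fun v => (v, p.1)))

def pvKeys (faces : List (List Int)) : List Int :=
  PySem.Set.ofList ((pvIncidence faces).map Prod.fst)

def pvIdx (faces : List (List Int)) (v : Int) : List Int :=
  ((PySem.List.enumerate faces).filter (fun p => decide (v ∈ PySem.List.dedup p.2))).map Prod.fst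

def pvCooccur (faces : List (List Int)) : List (Int × Int) :=
  (pvKeys faces).flatMap (fun v => pvPairsOf (pvIdx faces v))

def pvPre (faces : List (List Int)) : List (Int × Int) :=
  (PySem.Set.ofList (pvCooccur faces)).filter
    (fun p => ((List.count p (pvCooccur faces) : Int) == 2))

def pvLex (p q : Int × Int) : Prop := p.1 < q.1 ∨ (p.1 = q.1 ∧ p.2 < q.2)

-- ---- A-side ----
theorem pvA_eq (faces : List (List Int)) : find_cube_edges faces = pvA faces := by
  unfold find_cube_edges pvA
  rw [PySem.List.foldl_congr_mem _ _
      (fun (edges : List (Int × Int)) i => edges ++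
        ((PySem.List.pyRange (i + 1) (PySem.List.len faces)).filter (fun j => pvShared faces i j)).map
          (fun j => (i, j)))
      _ (by
        intro acc i _
        exact PySem.List.foldl_append_if (fun j => pvShared faces i j) (fun j => (i, j)) _ acc)]
  rw [PySem.List.foldl_append_eq_flatMap]
  simp

theorem pv_mem_A (faces : List (List Int)) (p : Int × Int) :
    p ∈ pvA faces ↔
      0 ≤ p.1 ∧ p.1 < p.2 ∧ p.2 < PySem.List.len faces ∧ pvShared faces p.1 p.2 = true := by
  obtain ⟨a, b⟩ := p
  simp only [pvA, List.mem_flatMap, List.mem_map, List.mem_filter, PySem.List.mem_pyRange_one,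
    Prod.mk.injEq]
  constructor
  · rintro ⟨i, ⟨hi0, hin⟩, j, ⟨⟨hj1, hj2⟩, hs⟩, hia, hjb⟩
    subst hia; subst hjb
    exact ⟨hi0, by omega, hj2, hs⟩
  · rintro ⟨h0, hab, hbn, hs⟩
    exact ⟨a, ⟨h0, by omega⟩, b, ⟨⟨by omega, hbn⟩, hs⟩, rfl, rfl⟩

theorem pv_pairwise_A (faces : List (List Int)) : (pvA faces).Pairwise pvLex := by
  rw [pvA, List.pairwise_flatMap]
  constructor
  · intro i _
    rw [List.pairwise_map]
    exact (List.Pairwise.filter _ (PySem.List.pairwise_lt_pyRange_one _ _)).imp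
      (fun h => Or.inr ⟨rfl, h⟩)
  · refine (PySem.List.pairwise_lt_pyRange_one _ _).imp ?_
    intro i₁ i₂ hlt x hx y hy
    rw [List.mem_map] at hx hy
    obtain ⟨j₁, -, rfl⟩ := hx
    obtain ⟨j₂, -, rfl⟩ := hy
    exact Or.inl hlt

theorem pv_nodup_A (faces : List (List Int)) : (pvA faces).Nodup := by
  refine (pv_pairwise_A faces).imp ?_
  intro p q h
  rintro rfl
  rcases h with h | ⟨-, h⟩ <;> exact lt_irrefl _ h

-- ---- B-side: unfolding the ported program ----
theorem pv_filter_beq_of_nodup (xs : List Int) (v : Int) (h : xs.Nodup) :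
    xs.filter (fun u => u == v) = if v ∈ xs then [v] else [] := by
  induction xs with
  | nil => simp
  | cons x t ih =>
    simp only [List.nodup_cons] at h
    by_cases hx : x = v
    · subst hx
      have ht : t.filter (fun u => u == x) = [] := by
        rw [List.filter_eq_nil_iff]
        intro u hu
        simp only [beq_iff_eq]
        rintro rfl
        exact h.1 hu
      simp [ht]
    · have hne : (x == v) = false := by simp [hx]
      simp [hne, ih h.2, List.mem_cons, Ne.symm hx]

theorem pv_incidence_filter (v : Int) (l : List (Int × List Int)) :
    ((l.flatMap (fun p => (PySem.List.dedup p.2).map (fun u => (u, p.1)))).filter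
        (fun q => q.1 == v)).map Prod.snd =
      (l.filter (fun p => decide (v ∈ PySem.List.dedup p.2))).map Prod.fst := by
  induction l with
  | nil => simp
  | cons p t ih =>
    simp only [List.flatMap_cons, List.filter_append, List.map_append, ih]
    rw [List.filter_map]
    have hcomp : ((fun q : Int × Int => q.1 == v) ∘ fun u => (u, p.1)) = fun u => u == v := rfl
    rw [hcomp, pv_filter_beq_of_nodup _ _ (PySem.List.nodup_dedup p.2)]
    by_cases hv : v ∈ p.2 <;> simp [hv]

theorem pvB_eq (faces : List (List Int)) :
    find_cube_edges_alt faces = PySem.List.sorted2 (pvPre faces) Prod.fst Prod.snd := by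
  unfold find_cube_edges_alt
  have hkeys :
      ((pvIncidence faces).foldl
        (fun d p => d.modify p.1 [] (fun l => l ++ [p.2])) PySem.Dict.empty).keys = pvKeys faces := by
    rw [PySem.Dict.keys_foldl_modify_key (pvIncidence faces) Prod.fst []
        (fun _ x l => l ++ [x.2]) PySem.Dict.empty]
    rw [PySem.Dict.keys_empty, PySem.Set.update_nil_left]
    rfl
  have hnodup :
      ((pvIncidence faces).foldl
        (fun d p => d.modify p.1 [] (fun l => l ++ [p.2])) PySem.Dict.empty).keys.Nodup := by
    rw [hkeys]
    exact PySem.Set.nodup_ofList _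
  have hgetD : ∀ v : Int,
      ((pvIncidence faces).foldl
        (fun d p => d.modify p.1 [] (fun l => l ++ [p.2])) PySem.Dict.empty).getD v [] =
        pvIdx faces v := by
    intro v
    rw [PySem.Dict.getD_foldl_modify_append (pvIncidence faces) PySem.Dict.empty v,
      PySem.Dict.getD_empty]
    have := pv_incidence_filter v (PySem.List.enumerate faces)
    simpa [pvIncidence, pvIdx] using this
  have hvalues :
      ((pvIncidence faces).foldl
        (fun d p => d.modify p.1 [] (fun l => l ++ [p.2])) PySem.Dict.empty).values =
        (pvKeys faces).map (pvIdx faces) := by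
    rw [PySem.Dict.values_eq_map_keys _ hnodup []]
    rw [hkeys]
    exact List.map_congr_left (fun v _ => hgetD v)
  show PySem.List.sorted2 _ _ _ = _
  rw [show ((PySem.List.enumerate faces).flatMap
      (fun p => (PySem.List.dedup p.2).map (fun v => (v, p.1)))) = pvIncidence faces from rfl]
  rw [hvalues, PySem.List.foldl_append_eq_flatMap, List.nil_append, List.flatMap_map]
  rw [show ((pvKeys faces).flatMap (fun a => pvPairsOf (pvIdx faces a))) = pvCooccur faces from rfl]
  rw [PySem.Dict.foldl_insert_getD_add_one_eq_counter, PySem.Dict.items_counter]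
  rw [List.filter_map, List.map_map]
  simp only [Function.comp_def]
  simp [pvPre, List.map_id']

-- ---- pvIdx facts ----
theorem pv_mem_idx (faces : List (List Int)) (v a : Int) :
    a ∈ pvIdx faces v ↔
      ∃ k : Nat, ∃ _ : k < faces.length, a = (k : Int) ∧ v ∈ faces[k] := by
  simp only [pvIdx, List.mem_map, List.mem_filter, PySem.List.mem_enumerate_iff,
    PySem.List.mem_dedup, decide_eq_true_eq]
  constructor
  · rintro ⟨p, ⟨⟨k, hk, rfl⟩, hv⟩, rfl⟩
    exact ⟨k, hk, by simp, by simpa using hv⟩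
  · rintro ⟨k, hk, rfl, hv⟩
    exact ⟨((0 : Int) + (k : Int), faces[k]), ⟨⟨k, hk, rfl⟩, by simpa using hv⟩, by simp⟩

theorem pv_pairwise_idx (faces : List (List Int)) (v : Int) :
    (pvIdx faces v).Pairwise (· < ·) := by
  rw [pvIdx, List.pairwise_map]
  exact List.Pairwise.filter _ (PySem.List.pairwise_lt_enumerate faces 0)

theorem pv_mem_keys (faces : List (List Int)) (v : Int) :
    v ∈ pvKeys faces ↔ ∃ k : Nat, ∃ _ : k < faces.length, v ∈ faces[k] := by
  simp only [pvKeys, PySem.Set.mem_ofList, pvIncidence, List.mem_map, List.mem_flatMap,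
    PySem.List.mem_enumerate_iff, PySem.List.mem_dedup]
  constructor
  · rintro ⟨q, ⟨p, ⟨k, hk, rfl⟩, hq⟩, rfl⟩
    obtain ⟨u, hu, rfl⟩ := hq
    exact ⟨k, hk, by simpa using hu⟩
  · rintro ⟨k, hk, hv⟩
    exact ⟨(v, (0 : Int) + (k : Int)),
      ⟨((0 : Int) + (k : Int), faces[k]), ⟨k, hk, rfl⟩, ⟨v, by simpa using hv, rfl⟩⟩, rfl⟩

-- ---- counting in pvPairsOf ----
theorem pv_count_pairsOf (ids : List Int) (h : ids.Pairwise (· < ·)) (a b : Int) :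
    List.count (a, b) (pvPairsOf ids) =
      if a ∈ ids ∧ b ∈ ids ∧ a < b then 1 else 0 := by
  induction ids with
  | nil => simp [pvPairsOf]
  | cons x t ih =>
    have hx : ∀ u ∈ t, x < u := (List.pairwise_cons.mp h).1
    have ht : t.Pairwise (· < ·) := (List.pairwise_cons.mp h).2
    have hnd : t.Nodup := ht.imp ne_of_lt
    have hxt : x ∉ t := fun hc => lt_irrefl x (hx x hc)
    have hmap : List.count (a, b) (t.map (fun u => (x, u))) = if x = a ∧ b ∈ t then 1 else 0 := by
      rw [List.count_eq_countP, List.countP_map]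
      by_cases hxa : x = a
      · subst hxa
        have : ((fun y => y == (x, b)) ∘ fun u => (x, u)) = fun u => u == b := by
          funext u; simp
        rw [this, ← List.count_eq_countP]
        by_cases hbt : b ∈ t
        · simp [hbt, List.count_eq_one_of_mem hnd hbt]
        · simp [hbt, List.count_eq_zero_of_not_mem hbt]
      · have : ((fun y => y == (a, b)) ∘ fun u => (x, u)) = fun _ => false := by
          funext u; simp [hxa]
        simp [this, hxa]
    rw [pvPairsOf, List.count_append, hmap, ih ht]
    by_cases hxa : x = a
    · subst hxa
      by_cases hbt : b ∈ t
      · have hxb := hx b hbt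
        simp [hbt, hxt, List.mem_cons, hxb]
      · by_cases hbx : b = x
        · subst hbx
          simp [hbt, List.mem_cons]
        · simp [hbt, hxt, List.mem_cons, hbx]
    · by_cases hat : a ∈ t
      · have hxa' := hx a hat
        by_cases hbx : b = x
        · subst hbx
          have : ¬ a < b := by omega
          simp [hat, hxa, List.mem_cons, this, Ne.symm hxa]
        · simp only [List.mem_cons, hbx, false_or]
          simp [hat, Ne.symm hxa]
          exact fun hc => absurd hc hxa
      · simp [hat, hxa, List.mem_cons, Ne.symm hxa]

theorem pv_count_cooccur (faces : List (List Int)) (a b : Int) :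
    List.count (a, b) (pvCooccur faces) =
      List.countP (fun v => decide (a ∈ pvIdx faces v) && decide (b ∈ pvIdx faces v) && decide (a < b))
        (pvKeys faces) := by
  rw [pvCooccur, List.count_flatMap]
  have hmap : (pvKeys faces).map (List.count (a, b) ∘ fun v => pvPairsOf (pvIdx faces v)) =
      (pvKeys faces).map (fun v => if a ∈ pvIdx faces v ∧ b ∈ pvIdx faces v ∧ a < b then 1 else 0) :=
    List.map_congr_left (fun v _ => pv_count_pairsOf (pvIdx faces v) (pv_pairwise_idx faces v) a b)
  rw [hmap]
  generalize pvKeys faces = l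
  induction l with
  | nil => simp
  | cons x t ih =>
    rw [List.map_cons, List.sum_cons, List.countP_cons, ih]
    by_cases h1 : a ∈ pvIdx faces x <;> by_cases h2 : b ∈ pvIdx faces x <;>
      by_cases h3 : a < b <;> simp [h1, h2, h3, Nat.add_comm]

theorem pv_count_eq_shared (faces : List (List Int)) (a b : Int)
    (ha : 0 ≤ a) (han : a < PySem.List.len faces) (hb : 0 ≤ b) (hbn : b < PySem.List.len faces)
    (hab : a < b) :
    List.count (a, b) (pvCooccur faces) =
      (PySem.Set.inter (PySem.Set.ofList (PySem.List.pyGetD faces a []))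
        (PySem.Set.ofList (PySem.List.pyGetD faces b []))).length := by
  have hna : ((a.toNat : Int)) = a := Int.toNat_of_nonneg ha
  have hnb : ((b.toNat : Int)) = b := Int.toNat_of_nonneg hb
  have hlna : a.toNat < faces.length := by
    simp only [PySem.List.len] at han; omega
  have hlnb : b.toNat < faces.length := by
    simp only [PySem.List.len] at hbn; omega
  have hga : PySem.List.pyGetD faces a [] = faces[a.toNat] := by
    conv_lhs => rw [← hna]
    rw [PySem.List.pyGetD_natCast, List.getD_eq_getElem?_getD, List.getElem?_eq_getElem hlna,
      Option.getD_some]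
  have hgb : PySem.List.pyGetD faces b [] = faces[b.toNat] := by
    conv_lhs => rw [← hnb]
    rw [PySem.List.pyGetD_natCast, List.getD_eq_getElem?_getD, List.getElem?_eq_getElem hlnb,
      Option.getD_some]
  have hmema : ∀ v : Int, a ∈ pvIdx faces v ↔ v ∈ faces[a.toNat] := by
    intro v
    rw [pv_mem_idx]
    constructor
    · rintro ⟨k, hk, hak, hvk⟩
      have : k = a.toNat := by omega
      subst this; exact hvk
    · intro hv; exact ⟨a.toNat, hlna, hna.symm, hv⟩
  have hmemb : ∀ v : Int, b ∈ pvIdx faces v ↔ v ∈ faces[b.toNat] := by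
    intro v
    rw [pv_mem_idx]
    constructor
    · rintro ⟨k, hk, hbk, hvk⟩
      have : k = b.toNat := by omega
      subst this; exact hvk
    · intro hv; exact ⟨b.toNat, hlnb, hnb.symm, hv⟩
  rw [pv_count_cooccur, List.countP_eq_length_filter, hga, hgb]
  have hperm : (List.filter
      (fun v => decide (a ∈ pvIdx faces v) && decide (b ∈ pvIdx faces v) && decide (a < b))
      (pvKeys faces)).Perm
      (PySem.Set.inter (PySem.Set.ofList faces[a.toNat]) (PySem.Set.ofList faces[b.toNat])) := by
    refine (List.perm_ext_iff_of_nodup ?_ ?_).mpr ?_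
    · exact List.Nodup.filter _ (by rw [pvKeys]; exact PySem.Set.nodup_ofList _)
    · exact PySem.Set.nodup_inter _ _ (PySem.Set.nodup_ofList _)
    intro v
    rw [List.mem_filter, PySem.Set.mem_inter, PySem.Set.mem_ofList, PySem.Set.mem_ofList]
    simp only [Bool.and_eq_true, decide_eq_true_eq, hmema, hmemb]
    constructor
    · rintro ⟨-, ⟨hva, hvb⟩, -⟩
      exact ⟨hva, hvb⟩
    · rintro ⟨hva, hvb⟩
      exact ⟨(pv_mem_keys faces v).mpr ⟨a.toNat, hlna, hva⟩, ⟨hva, hvb⟩, hab⟩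
  exact hperm.length_eq

-- ---- membership in pvPre matches membership in pvA ----
theorem pv_mem_pre (faces : List (List Int)) (p : Int × Int) :
    p ∈ pvPre faces ↔ p ∈ pvA faces := by
  obtain ⟨a, b⟩ := p
  have hmem : (a, b) ∈ pvPre faces ↔ List.count (a, b) (pvCooccur faces) = 2 := by
    rw [pvPre, List.mem_filter, PySem.Set.mem_ofList]
    constructor
    · rintro ⟨-, hc⟩
      have h2 : ((List.count (a, b) (pvCooccur faces) : Int)) = 2 := by simpa using hc
      exact_mod_cast h2
    · intro hc
      refine ⟨List.count_pos_iff.mp (by omega), ?_⟩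
      have h2 : ((List.count (a, b) (pvCooccur faces) : Int)) = 2 := by exact_mod_cast hc
      simpa using h2
  rw [hmem, pv_mem_A]
  by_cases hab : a < b
  · constructor
    · intro hc
      have hpos : 0 < List.countP
          (fun v => decide (a ∈ pvIdx faces v) && decide (b ∈ pvIdx faces v) && decide (a < b))
          (pvKeys faces) := by
        rw [← pv_count_cooccur]; omega
      obtain ⟨v, -, hv⟩ := List.countP_pos_iff.mp hpos
      simp only [Bool.and_eq_true, decide_eq_true_eq] at hv
      obtain ⟨⟨hva, hvb⟩, -⟩ := hv
      obtain ⟨k, hk, rfl, -⟩ := (pv_mem_idx faces v a).mp hva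
      obtain ⟨k', hk', rfl, -⟩ := (pv_mem_idx faces v b).mp hvb
      have ha : (0 : Int) ≤ (k : Int) := by positivity
      have hb : (0 : Int) ≤ (k' : Int) := by positivity
      have han : (k : Int) < PySem.List.len faces := by
        simp only [PySem.List.len]; omega
      have hbn : (k' : Int) < PySem.List.len faces := by
        simp only [PySem.List.len]; omega
      refine ⟨ha, hab, hbn, ?_⟩
      rw [pv_count_eq_shared faces _ _ ha han hb hbn hab] at hc
      simp only [pvShared, PySem.Set.len_eq, beq_iff_eq]
      exact_mod_cast hc
    · rintro ⟨ha, -, hbn, hs⟩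
      have hb : (0 : Int) ≤ b := by omega
      have han : a < PySem.List.len faces := by omega
      rw [pv_count_eq_shared faces a b ha han hb hbn hab]
      simp only [pvShared, PySem.Set.len_eq, beq_iff_eq] at hs
      exact_mod_cast hs
  · constructor
    · intro hc
      rw [pv_count_cooccur] at hc
      have : (fun v => decide (a ∈ pvIdx faces v) && decide (b ∈ pvIdx faces v) && decide (a < b)) =
          fun _ => false := by
        funext v; simp [hab]
      rw [this] at hc
      simp at hc
    · rintro ⟨-, hab', -⟩
      exact absurd hab' hab

theorem pv_nodup_pre (faces : List (List Int)) : (pvPre faces).Nodup :=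
  List.Nodup.filter _ (PySem.Set.nodup_ofList _)

-- ---- the final sort ----
theorem pv_sorted2_eq_sorted_lex (xs : List (Int × Int)) :
    PySem.List.sorted2 xs Prod.fst Prod.snd =
      PySem.List.sorted xs (fun p : Int × Int => toLex p) := by
  simp only [PySem.List.sorted2, PySem.List.sorted]
  have hbefore : (fun (a b : Int × Int) =>
      (decide (a.1 < b.1) || (!decide (b.1 < a.1) && decide (a.2 < b.2)))) =
      (fun (a b : Int × Int) => decide (toLex a < toLex b)) := by
    funext a b
    simp only [Prod.Lex.lt_iff, ofLex_toLex]
    by_cases h1 : a.1 < b.1 <;> by_cases h2 : b.1 < a.1 <;> by_cases h3 : a.2 < b.2 <;>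
      simp [h1, h2, h3] <;> omega
  simp only [Bool.false_eq_true, if_false, hbefore]

theorem pv_sorted_pre (faces : List (List Int)) :
    PySem.List.sorted2 (pvPre faces) Prod.fst Prod.snd = pvA faces := by
  rw [pv_sorted2_eq_sorted_lex]
  refine PySem.List.sorted_eq_of_perm_of_pairwise_lt _ _ _ ?_ ?_
  · rw [List.perm_ext_iff_of_nodup (pv_nodup_A faces) (pv_nodup_pre faces)]
    intro p
    exact (pv_mem_pre faces p).symm
  · refine (pv_pairwise_A faces).imp ?_
    intro p q h
    rw [Prod.Lex.lt_iff]
    simpa using h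


-- ===== VERDICT (by name: the statement is the Claim_ definition above) =====
theorem find_cube_edges_spec : Claim_equal_find_cube_edges := by
  intro faces _
  unfold Spec_find_cube_edges
  rw [pvA_eq, pvB_eq, pv_sorted_pre]
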